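-- pv_equiv track=rewrite | github.com/Naboni/Competitive-Programming | Codeforces Contest/3/C_Maximum_Sum_of_Digits.py | solve
-- ===== SOURCE A (Python) =====
-- def sumOfDigits(num):
--     summ = 0
--     while num:
--         summ += num % 10
--         num = num // 10
--     return summ
--
-- def solve(num):
--     if num < 9:
--         return num
--     else:
--         x = 0
--         while x*10+9 <= num:
--             x = x*10+9
--         return sumOfDigits(x) + sumOfDigits(num-x)
-- ===== SOURCE B (Python) =====
-- def digitSum(n):
--     s = 0
--     while n:
--         s += n % 10
--         n //= 10
--     return s
--
-- def solve(num):
--     # Enumerate every candidate split a = 10**j - 1 (a <= num) and take the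
--     # maximum of digitSum(a) + digitSum(num - a): brute force over the 9s
--     # candidates instead of constructing the single largest one greedily.
--     if num < 9:
--         return num
--     best = 0
--     p = 1
--     while p - 1 <= num:
--         best = max(best, digitSum(p - 1) + digitSum(num - p + 1))
--         p *= 10
--     return best
-- ===== Notes on version B (the rewrite author's own statement) =====
-- stated objective: alternative
-- what changed: instead of greedily constructing the single largest all-9s number and summing two digit sums, B enumerates every candidate split a = 10**j - 1 up to num and returns the maximum of digitSum(a) + digitSum(num-a); the maximum equals A's value because the candidate value is monotone in j by subadditivity of the digit sum
import Mathlib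
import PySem

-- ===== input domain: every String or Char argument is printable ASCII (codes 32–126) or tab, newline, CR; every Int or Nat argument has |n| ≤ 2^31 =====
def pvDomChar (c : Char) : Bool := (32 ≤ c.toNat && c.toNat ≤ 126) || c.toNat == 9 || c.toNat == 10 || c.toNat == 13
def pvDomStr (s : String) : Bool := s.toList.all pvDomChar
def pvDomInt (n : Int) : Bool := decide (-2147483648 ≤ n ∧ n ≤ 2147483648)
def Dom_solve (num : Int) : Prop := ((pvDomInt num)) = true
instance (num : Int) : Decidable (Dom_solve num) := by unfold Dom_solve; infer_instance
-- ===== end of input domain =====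

-- B enumerates every candidate split a = 10^j - 1 and takes the maximum of
-- digitSum(a) + digitSum(num-a), instead of A's greedy construction of the
-- single largest all-9s number; equal by monotonicity of the candidate value.


-- ===== PORT A =====
-- sumOfDigits: Python's `while num:` loop. For num < 0 Python diverges (solve
-- never calls it with a negative argument); the `num ≤ 0` guard only totalizes.
def sumOfDigits (num : Int) : Int :=
  if _h : num ≤ 0 then 0
  else PySem.Int.mod num 10 + sumOfDigits (PySem.Int.floordiv num 10)
termination_by num.toNat
decreasing_by
  simp only [PySem.Int.floordiv, Int.fdiv_eq_ediv]
  omega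

-- the `while x*10+9 <= num` loop; x starts at 0 and stays nonnegative, so the
-- state is carried as a Nat (the arithmetic x*10+9 is the same on Nat).
def ninesLoop (num : Int) (x : Nat) : Nat :=
  if _h : ((x * 10 + 9 : Nat) : Int) ≤ num then ninesLoop num (x * 10 + 9) else x
termination_by num.toNat - x
decreasing_by omega

def solve (num : Int) : Int :=
  if num < 9 then num
  else
    let x : Int := (ninesLoop num 0 : Nat)
    sumOfDigits x + sumOfDigits (num - x)

-- ===== PORT B =====
-- Source B's digitSum: same `while n:` loop shape; the `n ≤ 0` guard only totalizes
-- (B only calls it with nonnegative arguments).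
def digitSumB (n : Int) : Int :=
  if _h : n ≤ 0 then 0
  else PySem.Int.mod n 10 + digitSumB (PySem.Int.floordiv n 10)
termination_by n.toNat
decreasing_by
  simp only [PySem.Int.floordiv, Int.fdiv_eq_ediv]
  omega

-- Source B's `while p - 1 <= num:` candidate loop; p (= 1, 10, 100, …) is carried
-- as a Nat, and fuel only totalizes the recursion (num.toNat + 2 steps always
-- suffice to falsify the guard, since p at least doubles each iteration).
def bestLoop (fuel : Nat) (num : Int) (p : Nat) (best : Int) : Int :=
  match fuel with
  | 0 => best
  | f + 1 =>
    if (p : Int) - 1 ≤ num then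
      bestLoop f num (p * 10)
        (max best (digitSumB ((p : Int) - 1) + digitSumB (num - (p : Int) + 1)))
    else best

def solve_alt (num : Int) : Int :=
  if num < 9 then num
  else bestLoop (num.toNat + 2) num 1 0

-- ===== PRECONDITION & SPEC =====
def Spec_solve (num : Int) (out : Int) : Prop := out = solve_alt num
instance (num : Int) (out : Int) : Decidable (Spec_solve num out) := by unfold Spec_solve; infer_instance

-- ===== CLAIM (what is proved, stated in full; the proofs are below) =====
def Claim_equal_solve : Prop := ∀ (num : Int), Dom_solve num → Spec_solve num (solve num)

-- ===== LEMMAS AND PROOFS =====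

-- digit sum on Nat, the common reference for both ports' digit-sum loops
def sdN (n : Nat) : Nat :=
  if n = 0 then 0 else n % 10 + sdN (n / 10)
termination_by n
decreasing_by omega

lemma sumOfDigits_natCast (n : Nat) : sumOfDigits (n : Int) = (sdN n : Int) := by
  induction n using Nat.strong_induction_on with
  | _ n ih =>
    rw [sumOfDigits, sdN]
    by_cases h : n = 0
    · simp [h]
    · have h1 : ¬ ((n : Int) ≤ 0) := by omega
      have h2 : (n : Int).fdiv 10 = ((n / 10 : Nat) : Int) := by
        rw [Int.fdiv_eq_ediv, if_pos (Or.inl (by norm_num : (0:Int) ≤ 10))]; omega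
      have h3 : (n : Int).fmod 10 = ((n % 10 : Nat) : Int) := by
        rw [Int.fmod_eq_emod, if_pos (Or.inl (by norm_num : (0:Int) ≤ 10))]; omega
      simp only [PySem.Int.mod, PySem.Int.floordiv, h1, dif_neg, not_false_iff, h, if_neg,
        h2, h3, ih (n / 10) (by omega)]
      push_cast; ring

lemma digitSumB_natCast (n : Nat) : digitSumB (n : Int) = (sdN n : Int) := by
  induction n using Nat.strong_induction_on with
  | _ n ih =>
    rw [digitSumB, sdN]
    by_cases h : n = 0
    · simp [h]
    · have h1 : ¬ ((n : Int) ≤ 0) := by omega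
      have h2 : (n : Int).fdiv 10 = ((n / 10 : Nat) : Int) := by
        rw [Int.fdiv_eq_ediv, if_pos (Or.inl (by norm_num : (0:Int) ≤ 10))]; omega
      have h3 : (n : Int).fmod 10 = ((n % 10 : Nat) : Int) := by
        rw [Int.fmod_eq_emod, if_pos (Or.inl (by norm_num : (0:Int) ≤ 10))]; omega
      simp only [PySem.Int.mod, PySem.Int.floordiv, h1, dif_neg, not_false_iff, h, if_neg,
        h2, h3, ih (n / 10) (by omega)]
      push_cast; ring

lemma sdN_zero : sdN 0 = 0 := by rw [sdN]; simp

lemma sdN_nines (k : Nat) : sdN (10 ^ k - 1) = 9 * k := by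
  induction k with
  | zero => norm_num [sdN_zero]
  | succ k ih =>
    have hp : 1 ≤ 10 ^ k := Nat.one_le_pow _ _ (by norm_num)
    have he : 10 ^ (k + 1) = 10 * 10 ^ k := by ring
    rw [sdN]
    have h0 : ¬ (10 ^ (k + 1) - 1 = 0) := by omega
    have hm : (10 ^ (k + 1) - 1) % 10 = 9 := by omega
    have hd : (10 ^ (k + 1) - 1) / 10 = 10 ^ k - 1 := by omega
    rw [if_neg h0, hm, hd, ih]; ring

lemma sdN_nine_pow (k : Nat) : sdN (9 * 10 ^ k) = 9 := by
  induction k with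
  | zero => norm_num; rw [sdN]; norm_num [sdN_zero]
  | succ k ih =>
    have hp : 1 ≤ 10 ^ k := Nat.one_le_pow _ _ (by norm_num)
    have he : 9 * 10 ^ (k + 1) = 10 * (9 * 10 ^ k) := by ring
    rw [sdN]
    have h0 : ¬ (9 * 10 ^ (k + 1) = 0) := by positivity
    have hm : 9 * 10 ^ (k + 1) % 10 = 0 := by omega
    have hd : 9 * 10 ^ (k + 1) / 10 = 9 * 10 ^ k := by omega
    rw [if_neg h0, hm, hd, ih]

-- subadditivity of the digit sum: S(a+b) ≤ S(a) + S(b)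
lemma sdN_subadd (a b : Nat) : sdN (a + b) ≤ sdN a + sdN b := by
  induction hn : a + b using Nat.strong_induction_on generalizing a b with
  | _ n ih =>
    subst hn
    by_cases hs : a + b < 10
    · have ha : sdN a = a := by rw [sdN]; split_ifs with h <;> [omega; (rw [show a / 10 = 0 by omega, sdN_zero]; omega)]
      have hb : sdN b = b := by rw [sdN]; split_ifs with h <;> [omega; (rw [show b / 10 = 0 by omega, sdN_zero]; omega)]
      have hab : sdN (a + b) = a + b := by
        rw [sdN]; split_ifs with h <;> [omega; (rw [show (a + b) / 10 = 0 by omega, sdN_zero]; omega)]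
      omega
    · have hc : (a % 10 + b % 10) / 10 ≤ 1 := by omega
      set c := (a % 10 + b % 10) / 10 with hcdef
      have hmod : (a + b) % 10 = a % 10 + b % 10 - 10 * c := by omega
      have hdiv : (a + b) / 10 = a / 10 + b / 10 + c := by omega
      have h1 : sdN (a / 10 + (b / 10 + c)) ≤ sdN (a / 10) + sdN (b / 10 + c) :=
        ih _ (by omega) _ _ rfl
      have h2 : sdN (b / 10 + c) ≤ sdN (b / 10) + sdN c := ih _ (by omega) _ _ rfl
      have hcs : sdN c = c := by
        interval_cases c
        · exact sdN_zero
        · rw [sdN]; norm_num [sdN_zero]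
      have ha : sdN a = a % 10 + sdN (a / 10) := by
        by_cases h : a = 0
        · subst h; rw [sdN_zero]
        · rw [sdN, if_neg h]
      have hb : sdN b = b % 10 + sdN (b / 10) := by
        by_cases h : b = 0
        · subst h; rw [sdN_zero]
        · rw [sdN, if_neg h]
      have hab : sdN (a + b) = (a + b) % 10 + sdN ((a + b) / 10) := by
        rw [sdN]; split_ifs with h <;> [omega; rfl]
      rw [hab, hmod, hdiv, show a / 10 + b / 10 + c = a / 10 + (b / 10 + c) by ring]
      omega

-- the candidate value at exponent k (as a Nat)
def candN (N k : Nat) : Nat := 9 * k + sdN (N - (10 ^ k - 1))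

-- candidate values are monotone in the exponent as long as 10^k - 1 ≤ N
lemma candN_step (N j : Nat) (h : 10 ^ (j + 1) - 1 ≤ N) : candN N j ≤ candN N (j + 1) := by
  have hp : 1 ≤ 10 ^ j := Nat.one_le_pow _ _ (by norm_num)
  have he : 10 ^ (j + 1) = 10 * 10 ^ j := by ring
  have hsplit : N - (10 ^ j - 1) = (N - (10 ^ (j + 1) - 1)) + 9 * 10 ^ j := by omega
  have := sdN_subadd (N - (10 ^ (j + 1) - 1)) (9 * 10 ^ j)
  rw [sdN_nine_pow] at this
  unfold candN
  rw [hsplit]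
  omega

lemma candN_mono (N : Nat) : ∀ d j, 10 ^ (j + d) - 1 ≤ N → candN N j ≤ candN N (j + d) := by
  intro d
  induction d with
  | zero => intro j _; rfl
  | succ d ih =>
    intro j h
    have hp : 10 ^ (j + d) ≤ 10 ^ (j + (d + 1)) := Nat.pow_le_pow_right (by norm_num) (by omega)
    calc candN N j ≤ candN N (j + d) := ih j (by omega)
      _ ≤ candN N (j + d + 1) := candN_step N (j + d) (by rw [show j + d + 1 = j + (d + 1) by ring]; exact h)
      _ = candN N (j + (d + 1)) := by rw [Nat.add_assoc]

-- once the guard fails the loop returns best, whatever the fuel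
lemma bestLoop_stop (fuel : Nat) (num : Int) (p : Nat) (best : Int)
    (h : ¬ ((p : Int) - 1 ≤ num)) : bestLoop fuel num p best = best := by
  cases fuel with
  | zero => rfl
  | succ f => rw [bestLoop, if_neg h]

-- the candidate loop computes max best (candN N k) for the largest exponent k
lemma bestLoop_spec : ∀ (fuel : Nat) (N : Nat) (j : Nat) (best : Int),
    10 ^ j - 1 ≤ N → N + 2 ≤ 10 ^ (j + fuel) →
    ∃ k, j ≤ k ∧ 10 ^ k - 1 ≤ N ∧ N < 10 ^ (k + 1) - 1 ∧
      bestLoop fuel (N : Int) (10 ^ j) best = max best ((candN N k : Nat) : Int) := by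
  intro fuel
  induction fuel with
  | zero =>
    intro N j best hle hf
    exfalso; simp only [Nat.add_zero] at hf; omega
  | succ f ih =>
    intro N j best hle hf
    have hp : 1 ≤ 10 ^ j := Nat.one_le_pow _ _ (by norm_num)
    have hguard : ((10 ^ j : Nat) : Int) - 1 ≤ (N : Int) := by omega
    have hsub : (N : Int) - ((10 ^ j : Nat) : Int) + 1 = ((N - (10 ^ j - 1) : Nat) : Int) := by
      omega
    have hprev : ((10 ^ j : Nat) : Int) - 1 = ((10 ^ j - 1 : Nat) : Int) := by omega
    have hcand : digitSumB (((10 ^ j : Nat) : Int) - 1) +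
        digitSumB ((N : Int) - ((10 ^ j : Nat) : Int) + 1) = ((candN N j : Nat) : Int) := by
      rw [hprev, hsub, digitSumB_natCast, digitSumB_natCast, sdN_nines]
      unfold candN; push_cast; ring
    rw [bestLoop, if_pos hguard, hcand]
    by_cases hnext : 10 ^ (j + 1) - 1 ≤ N
    · have hpow : (10 ^ j) * 10 = 10 ^ (j + 1) := by ring
      rw [hpow]
      obtain ⟨k, hk1, hk2, hk3, hk4⟩ :=
        ih N (j + 1) (max best ((candN N j : Nat) : Int)) hnext
          (by rw [show j + 1 + f = j + (f + 1) by ring]; exact hf)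
      refine ⟨k, by omega, hk2, hk3, ?_⟩
      rw [hk4, max_assoc]
      congr 1
      have : candN N j ≤ candN N k := by
        obtain ⟨d, rfl⟩ : ∃ d, k = j + d := ⟨k - j, by omega⟩
        exact candN_mono N d j hk2
      exact max_eq_right (by exact_mod_cast this)
    · have hpow : (10 ^ j) * 10 = 10 ^ (j + 1) := by ring
      rw [hpow, bestLoop_stop _ _ _ _ (by omega)]
      exact ⟨j, le_rfl, hle, by omega, rfl⟩

-- the 99...9 loop reaches the largest all-9s number ≤ num
lemma ninesLoop_spec : ∀ (fuel : Nat) (num : Int) (i : Nat), 1 ≤ i →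
    ((10 ^ i - 1 : Nat) : Int) ≤ num → num.toNat + 2 - 10 ^ i ≤ fuel →
    ∃ m, 1 ≤ m ∧ ninesLoop num (10 ^ i - 1) = 10 ^ m - 1 ∧
      ((10 ^ m - 1 : Nat) : Int) ≤ num ∧ num < ((10 ^ (m + 1) - 1 : Nat) : Int) := by
  intro fuel
  induction fuel with
  | zero =>
    intro num i hi hle hf
    exfalso
    have hp : 10 ≤ 10 ^ i := by
      calc 10 = 10 ^ 1 := by norm_num
      _ ≤ 10 ^ i := Nat.pow_le_pow_right (by norm_num) hi
    omega
  | succ f ih =>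
    intro num i hi hle hf
    have hp : 1 ≤ 10 ^ i := Nat.one_le_pow _ _ (by norm_num)
    have hstep : (10 ^ i - 1) * 10 + 9 = 10 ^ (i + 1) - 1 := by
      have : 10 ^ (i + 1) = 10 * 10 ^ i := by ring
      omega
    rw [ninesLoop]
    by_cases hc : (((10 ^ i - 1) * 10 + 9 : Nat) : Int) ≤ num
    · rw [dif_pos hc, hstep]
      refine ih num (i + 1) (by omega) (by rwa [hstep] at hc) ?_
      have hp1 : 10 ^ (i + 1) = 10 * 10 ^ i := by ring
      omega
    · rw [dif_neg hc]
      exact ⟨i, hi, rfl, hle, by rwa [hstep, not_le] at hc⟩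

-- ===== VERDICT (by name: the statement is the Claim_ definition above) =====
theorem solve_spec : Claim_equal_solve := by
  intro num _
  unfold Spec_solve
  by_cases h9 : num < 9
  · unfold solve solve_alt
    simp [h9]
  · rw [not_lt] at h9
    obtain ⟨N, rfl⟩ : ∃ N : Nat, (N : Int) = num := ⟨num.toNat, by omega⟩
    have h9N : 9 ≤ N := by exact_mod_cast h9
    -- A: the first loop step takes x = 0 to x = 9 = 10^1 - 1
    have hfirst : ninesLoop (N : Int) 0 = ninesLoop (N : Int) (10 ^ 1 - 1) := by
      rw [ninesLoop]
      have h : ((0 * 10 + 9 : Nat) : Int) ≤ (N : Int) := by push_cast; omega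
      rw [dif_pos h]; norm_num
    obtain ⟨m, hm1, hloop, hlow, hhigh⟩ :=
      ninesLoop_spec (N + 2) (N : Int) 1 le_rfl (by push_cast; omega)
        (by simp only [Int.toNat_natCast]; omega)
    have hpm : 1 ≤ 10 ^ m := Nat.one_le_pow _ _ (by norm_num)
    have hp1 : 1 ≤ 10 ^ (m + 1) := Nat.one_le_pow _ _ (by norm_num)
    have hA : solve (N : Int) = ((candN N m : Nat) : Int) := by
      unfold solve
      rw [if_neg (by omega)]
      simp only [hfirst, hloop]
      show sumOfDigits ((10 ^ m - 1 : Nat) : Int) +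
          sumOfDigits ((N : Int) - ((10 ^ m - 1 : Nat) : Int)) = _
      have hsub : (N : Int) - ((10 ^ m - 1 : Nat) : Int) = ((N - (10 ^ m - 1) : Nat) : Int) := by
        omega
      rw [hsub, sumOfDigits_natCast, sumOfDigits_natCast, sdN_nines]
      unfold candN; push_cast; ring
    -- B: the candidate loop from p = 1 = 10^0 with fuel N + 2
    have hfuel : N + 2 ≤ 10 ^ (0 + (N + 2)) := by
      calc N + 2 ≤ 2 ^ (N + 2) := by
            have := Nat.lt_two_pow_self (n := N + 2); omega
        _ ≤ 10 ^ (N + 2) := Nat.pow_le_pow_left (by norm_num) _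
        _ = 10 ^ (0 + (N + 2)) := by rw [Nat.zero_add]
    obtain ⟨k, _, hk2, hk3, hk4⟩ := bestLoop_spec (N + 2) N 0 0 (by norm_num) hfuel
    have hB : solve_alt (N : Int) = max 0 ((candN N k : Nat) : Int) := by
      unfold solve_alt
      rw [if_neg (by omega)]
      simp only [Int.toNat_natCast]
      rw [show (10 : Nat) ^ 0 = 1 by norm_num] at hk4
      exact hk4
    -- the two exponents coincide
    have hkm : k = m := by
      have hlowN : 10 ^ m - 1 ≤ N := by omega
      have hhighN : N < 10 ^ (m + 1) - 1 := by omega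
      have h1 : 10 ^ m < 10 ^ (k + 1) := by omega
      have h2 : 10 ^ k < 10 ^ (m + 1) := by omega
      have h3 : m < k + 1 := (Nat.pow_lt_pow_iff_right (by norm_num)).mp h1
      have h4 : k < m + 1 := (Nat.pow_lt_pow_iff_right (by norm_num)).mp h2
      omega
    rw [hA, hB, hkm, max_eq_right (by positivity)]
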